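-- pv_equiv track=rewrite | github.com/jngm8/LeetcodeProblems | Maratones/rumor.py | resolucion
-- ===== SOURCE A (Python) =====
-- def resolucion(quantities):
--     lista = []
--     string = ""
--     for i in quantities:
--         if i != " ":
--             string += i
--         else:
--             lista.append(string)
--             string = ""
--
--     return lista #Lista tokenizada
-- ===== SOURCE B (Python) =====
-- def resolucion(quantities):
--     return quantities.split(" ")[:-1]
-- ===== Notes on version B (the rewrite author's own statement) =====
-- stated objective: faster
-- what changed: Replaces the explicit per-character accumulation loop with a single C-level space-split followed by slicing off the trailing unterminated segment.
import Mathlib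
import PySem

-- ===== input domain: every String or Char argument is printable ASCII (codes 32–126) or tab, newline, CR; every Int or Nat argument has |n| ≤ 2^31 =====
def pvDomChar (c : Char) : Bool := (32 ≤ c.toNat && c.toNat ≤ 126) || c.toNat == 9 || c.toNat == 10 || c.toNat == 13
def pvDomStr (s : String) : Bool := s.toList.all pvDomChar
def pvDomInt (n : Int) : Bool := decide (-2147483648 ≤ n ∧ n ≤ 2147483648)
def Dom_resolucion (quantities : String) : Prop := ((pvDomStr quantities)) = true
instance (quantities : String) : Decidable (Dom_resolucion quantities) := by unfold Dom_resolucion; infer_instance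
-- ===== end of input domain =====

-- B replaces A's explicit character-accumulation loop with one library split on " "
-- followed by dropping the trailing (unterminated) segment; same behaviour, idiomatic.

-- ===== PORT A =====
-- A: accumulate characters into `string`; on each space, append `string` to `lista`
-- and reset; return `lista` (the final partial token is discarded).
def resolucion (quantities : String) : List String :=
  (quantities.toList.foldl
    (fun (st : List String × String) i =>
      if i ≠ ' ' then (st.1, st.2.push i) else (st.1 ++ [st.2], ""))
    ([], "")).1

-- ===== PORT B =====
-- B: quantities.split(" ")[:-1]  (getD [] is a totality shim: split? is `some` since the
-- separator " " is the nonempty literal)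
def resolucion_alt (quantities : String) : List String :=
  PySem.List.slice ((PySem.Str.split? quantities " ").getD []) none (some (-1))

-- ===== PRECONDITION & SPEC =====
def Spec_resolucion (quantities : String) (out : List String) : Prop := out = resolucion_alt quantities
instance (quantities : String) (out : List String) : Decidable (Spec_resolucion quantities out) := by unfold Spec_resolucion; infer_instance

-- ===== CLAIM (what is proved, stated in full; the proofs are below) =====
def Claim_equal_resolucion : Prop := ∀ (quantities : String), Dom_resolucion quantities → Spec_resolucion quantities (resolucion quantities)

-- ===== LEMMAS AND PROOFS =====

-- reference splitter: tokens of `l` split at spaces, `cur` the reversed current token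
def pvSpl : List Char → List Char → List (List Char)
  | [], cur => [cur.reverse]
  | c :: rest, cur => if c = ' ' then cur.reverse :: pvSpl rest [] else pvSpl rest (c :: cur)

theorem pvSpl_ne_nil (l cur : List Char) : pvSpl l cur ≠ [] := by
  induction l generalizing cur with
  | nil => simp [pvSpl]
  | cons c rest ih => simp only [pvSpl]; split_ifs <;> simp [ih]

-- PySem's fuel-based splitter on separator [' '] agrees with pvSpl
theorem splitOn_go_eq (fuel : Nat) (l cur : List Char) (acc : List (List Char))
    (h : l.length < fuel) :
    PySem.Chars.splitOn.go [' '] fuel l cur acc = acc.reverse ++ pvSpl l cur := by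
  induction fuel generalizing l cur acc with
  | zero => omega
  | succ n ih =>
    cases l with
    | nil => simp [PySem.Chars.splitOn.go, pvSpl]
    | cons c rest =>
      by_cases hc : c = ' '
      · subst hc
        rw [show PySem.Chars.splitOn.go [' '] (n+1) (' ' :: rest) cur acc
              = PySem.Chars.splitOn.go [' '] n rest [] (cur.reverse :: acc) by
            simp [PySem.Chars.splitOn.go, List.isPrefixOf]]
        rw [ih rest [] (cur.reverse :: acc) (by simpa using Nat.lt_of_succ_lt_succ h)]
        simp [pvSpl]
      · rw [show PySem.Chars.splitOn.go [' '] (n+1) (c :: rest) cur acc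
              = PySem.Chars.splitOn.go [' '] n rest (c :: cur) acc by
            simp [PySem.Chars.splitOn.go, List.isPrefixOf, (Ne.symm hc : ' ' ≠ c)]]
        rw [ih rest (c :: cur) acc (by simpa using Nat.lt_of_succ_lt_succ h)]
        simp [pvSpl, hc]

theorem splitOn_eq_pvSpl (s : List Char) :
    PySem.Chars.splitOn s [' '] = pvSpl s [] := by
  rw [show PySem.Chars.splitOn s [' '] = PySem.Chars.splitOn.go [' '] (s.length + 1) s [] [] from rfl]
  rw [splitOn_go_eq (s.length + 1) s [] [] (by omega)]
  simp

-- A's fold, characterised by pvSpl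
theorem foldA_eq (l : List Char) : ∀ (lista : List String) (str : String),
    (l.foldl
      (fun (st : List String × String) i =>
        if i ≠ ' ' then (st.1, st.2.push i) else (st.1 ++ [st.2], ""))
      (lista, str)).1
      = lista ++ (List.map String.ofList (pvSpl l str.toList.reverse)).dropLast := by
  induction l with
  | nil => intro lista str; simp [pvSpl]
  | cons c rest ih =>
    intro lista str
    by_cases hc : c = ' '
    · subst hc
      simp only [List.foldl_cons]
      rw [if_neg (show ¬((' ' : Char) ≠ ' ') by simp)]
      rw [ih (lista ++ [str]) ""]
      have hne : List.map String.ofList (pvSpl rest []) ≠ [] := by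
        simp [pvSpl_ne_nil]
      simp [pvSpl, List.dropLast_cons_of_ne_nil hne, String.ofList_toList]
    · simp only [List.foldl_cons]
      rw [if_pos (show c ≠ ' ' from hc)]
      rw [ih lista (str.push c)]
      simp [pvSpl, hc, String.toList_push]

-- ===== VERDICT (by name: the statement is the Claim_ definition above) =====
theorem resolucion_spec : Claim_equal_resolucion := by
  intro q _
  unfold Spec_resolucion resolucion resolucion_alt
  rw [foldA_eq]
  rw [show PySem.Str.split? q " " = some (List.map String.ofList (PySem.Chars.splitOn q.toList [' '])) from by
    simp [PySem.Str.split?, PySem.Chars.split?]]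
  simp [splitOn_eq_pvSpl, PySem.List.slice_to_neg_one]
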